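-- pv_equiv track=rewrite | github.com/InsideZhou/inside-utils | python/leetcode/P1974_minimum_time_to_type_word_using_special_typewriter.py | min_time_to_type_word
-- ===== SOURCE A (Python) =====
-- from string import ascii_lowercase
--
-- def min_time_to_type_word(word):
--     total_ticks, pointer, letter_count = 0, ascii_lowercase.index('a'), len(ascii_lowercase)
--
--     for letter in word:
--         target = ascii_lowercase.index(letter)
--         abs_diff = abs(target - pointer)
--         distance = min(abs_diff, letter_count - abs_diff)
--
--         pointer = target
--
--         total_ticks += distance  # move pointer
--         total_ticks += 1  # type current letter
--
--     return total_ticks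
-- ===== SOURCE B (Python) =====
-- # Table-driven aggregation: a 26x26 circular-distance matrix precomputed once,
-- # the word's transitions tallied into a frequency dict, movement summed once per
-- # DISTINCT transition weighted by its multiplicity; typing cost is len(word).
-- DIST = [[min(abs(i - j), 26 - abs(i - j)) for j in range(26)] for i in range(26)]
--
-- def min_time_to_type_word(word):
--     path = [0] + [ord(c) - 97 for c in word]
--     freq = {}
--     for pr in zip(path, path[1:]):
--         freq[pr] = freq.get(pr, 0) + 1
--     return len(word) + sum(DIST[a][b] * k for (a, b), k in freq.items())
-- ===== Notes on version B (the rewrite author's own statement) =====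
-- stated objective: faster
-- what changed: Replaces A's pointer-threading accumulator loop with a per-character ascii_lowercase.index scan by a precomputed 26x26 circular-distance table plus a frequency dict of the word's transitions: movement is summed once per distinct transition weighted by multiplicity, typing cost is len(word) in closed form.
import Mathlib
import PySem

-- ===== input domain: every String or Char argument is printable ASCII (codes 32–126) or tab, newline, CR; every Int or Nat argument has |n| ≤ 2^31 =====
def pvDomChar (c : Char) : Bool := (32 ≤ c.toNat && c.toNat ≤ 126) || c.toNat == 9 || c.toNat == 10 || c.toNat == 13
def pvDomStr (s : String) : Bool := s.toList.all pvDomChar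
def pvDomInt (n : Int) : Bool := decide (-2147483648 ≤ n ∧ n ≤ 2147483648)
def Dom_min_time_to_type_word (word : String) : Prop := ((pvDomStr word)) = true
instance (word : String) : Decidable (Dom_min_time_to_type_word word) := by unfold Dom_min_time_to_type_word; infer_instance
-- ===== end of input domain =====

-- B replaces A's iterative accumulator loop (26-scan per char) by a precomputed
-- 26x26 circular-distance table plus a frequency dict of transitions (movement summed once
-- per distinct transition, typing cost = len(word)); measured faster in a timing run.


-- ===== PORT A =====
-- ascii_lowercase
def pvLc : List Char := "abcdefghijklmnopqrstuvwxyz".toList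

-- one iteration of A's for-loop; `none` = the ValueError from ascii_lowercase.index
def pvStepA (st : Option (Int × Int)) (letter : Char) : Option (Int × Int) :=
  match st with
  | none => none
  | some (total_ticks, pointer) =>
    match PySem.List.index? pvLc letter with
    | none => none
    | some target =>
      let t : Int := (target : Int)
      let abs_diff : Int := |t - pointer|
      let distance : Int := min abs_diff ((pvLc.length : Int) - abs_diff)
      some (total_ticks + distance + 1, t)

def min_time_to_type_word (word : String) : Int :=
  ((word.toList.foldl pvStepA
      (some (0, ((PySem.List.index? pvLc 'a').getD 0 : Int)))).map (·.1)).getD 0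

-- ===== PORT B =====
-- the precomputed 26x26 circular-distance table DIST
def pvDist : List (List Int) :=
  (List.range 26).map (fun (i : Nat) =>
    (List.range 26).map (fun (j : Nat) =>
      min |(i : Int) - (j : Int)| (26 - |(i : Int) - (j : Int)|)))

-- DIST[a][b]; default never reached inside Pre_
def pvLookup (a b : Int) : Int :=
  (PySem.List.pyGet? ((PySem.List.pyGet? pvDist a).getD []) b).getD 0

def min_time_to_type_word_alt (word : String) : Int :=
  let path : List Int := 0 :: word.toList.map (fun c => (c.toNat : Int) - 97)
  let freq : PySem.Dict (Int × Int) Int :=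
    (path.zip path.tail).foldl (fun d pr => d.insert pr (d.getD pr 0 + 1)) PySem.Dict.empty
  (word.toList.length : Int) + (freq.items.map (fun kv => pvLookup kv.1.1 kv.1.2 * kv.2)).sum

-- ===== PRECONDITION & SPEC =====
-- Pre_ excludes exactly the words containing a character that is not a lowercase
-- ASCII letter, on which A raises ValueError (ascii_lowercase.index).
def Pre_min_time_to_type_word (word : String) : Prop :=
  (word.toList.all (fun c => 97 ≤ c.toNat && c.toNat ≤ 122)) = true
instance (word : String) : Decidable (Pre_min_time_to_type_word word) := by
  unfold Pre_min_time_to_type_word; infer_instance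

def pvWitness_min_time_to_type_word : String := "zjpc"

def Spec_min_time_to_type_word (word : String) (out : Int) : Prop := out = min_time_to_type_word_alt word
instance (word : String) (out : Int) : Decidable (Spec_min_time_to_type_word word out) := by unfold Spec_min_time_to_type_word; infer_instance

-- ===== CLAIM =====
def Claim_equal_min_time_to_type_word : Prop := ∀ (word : String), Dom_min_time_to_type_word word → Pre_min_time_to_type_word word → Spec_min_time_to_type_word word (min_time_to_type_word word)

-- ===== LEMMAS AND PROOFS =====

lemma pv_index_lc (c : Char) (hl : 97 ≤ c.toNat) (hh : c.toNat ≤ 122) :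
    PySem.List.index? pvLc c = some (c.toNat - 97) := by
  have hc : c = Char.ofNat c.toNat := (Char.ofNat_toNat c).symm
  set n := c.toNat with hn
  rw [hc]
  interval_cases n <;> decide

-- the table agrees with the circular-distance formula on in-range indices
lemma pv_dist (p t : Nat) (hp : p < 26) (ht : t < 26) :
    pvLookup (p : Int) (t : Int) = min |(t : Int) - (p : Int)| (26 - |(t : Int) - (p : Int)|) := by
  simp only [pvLookup, pvDist, PySem.List.pyGet?_natCast, List.getElem?_map,
    List.getElem?_range hp, List.getElem?_range ht, Option.map_some, Option.getD_some]
  rw [abs_sub_comm]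

-- summing an indicator over a duplicate-free list that contains x picks out f x
lemma pv_sum_ind {K : Type} [BEq K] [LawfulBEq K] (s : List K) (x : K) (f : K → Int)
    (hs : s.Nodup) (hx : x ∈ s) :
    (s.map (fun k => if k == x then f k else 0)).sum = f x := by
  induction s with
  | nil => cases hx
  | cons a s ih =>
    by_cases hax : a = x
    · subst hax
      have hz : (s.map (fun k => if k == a then f k else 0)).sum = 0 := by
        apply List.sum_eq_zero
        intro y hy
        obtain ⟨k, hk, rfl⟩ := List.mem_map.mp hy
        have hne : k ≠ a := fun e => (List.nodup_cons.mp hs).1 (e ▸ hk)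
        simp [hne]
      simp [hz]
    · have h : x ∈ s := by
        rcases List.mem_cons.mp hx with h | h
        · exact absurd h.symm hax
        · exact h
      have hne : (a == x) = false := beq_eq_false_iff_ne.mpr hax
      simp only [List.map_cons, List.sum_cons, hne, if_neg Bool.false_ne_true]
      rw [ih (List.nodup_cons.mp hs).2 h]
      ring

-- a multiplicity-weighted sum over the distinct elements equals the plain sum
lemma pv_sum_count {K : Type} [BEq K] [LawfulBEq K] (s : List K) (hs : s.Nodup) (f : K → Int)
    (xs : List K) (hsub : ∀ k ∈ xs, k ∈ s) :
    (s.map (fun k => f k * (xs.count k : Int))).sum = (xs.map f).sum := by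
  induction xs with
  | nil =>
    simp only [List.count_nil, List.map_nil, List.sum_nil, Nat.cast_zero, mul_zero]
    exact List.sum_eq_zero (by intro y hy; obtain ⟨k, _, rfl⟩ := List.mem_map.mp hy; rfl)
  | cons x xs ih =>
    have hx : x ∈ s := hsub x (List.mem_cons_self ..)
    have hsub' : ∀ k ∈ xs, k ∈ s := fun k hk => hsub k (List.mem_cons_of_mem _ hk)
    have hmap : s.map (fun k => f k * ((x :: xs).count k : Int))
        = s.map (fun k => f k * (xs.count k : Int) + (if k == x then f k else 0)) := by
      apply List.map_congr_left
      intro k _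
      by_cases h : k = x
      · subst h
        simp only [List.count_cons, BEq.rfl, if_true]
        push_cast
        ring
      · have hne : (k == x) = false := beq_eq_false_iff_ne.mpr h
        simp [List.count_cons, hne]
        exact Or.inl fun e => h e.symm
    rw [hmap, PySem.List.sum_map_add_int, ih hsub', pv_sum_ind s x f hs hx]
    simp only [List.map_cons, List.sum_cons]
    ring

-- main invariant: A's loop from state (acc, p) adds the length plus the pairwise
-- circular distances along (p :: positions)
lemma pv_mainA (l : List Char) (h : ∀ c ∈ l, 97 ≤ c.toNat ∧ c.toNat ≤ 122)
    (acc : Int) (p : Nat) (hp : p < 26) :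
    ((l.foldl pvStepA (some (acc, (p : Int)))).map (·.1)).getD 0
      = acc + (l.length : Int)
        + (((((p : Int)) :: l.map (fun c => (c.toNat : Int) - 97)).zip
             (l.map (fun c => (c.toNat : Int) - 97))).map
            (fun pr => pvLookup pr.1 pr.2)).sum := by
  induction l generalizing acc p with
  | nil => simp
  | cons c l ih =>
    obtain ⟨h1, h2⟩ := h c (List.mem_cons_self ..)
    have hrest : ∀ c ∈ l, 97 ≤ c.toNat ∧ c.toNat ≤ 122 := fun c hc => h c (List.mem_cons_of_mem _ hc)
    have hidx := pv_index_lc c h1 h2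
    have ht : c.toNat - 97 < 26 := by omega
    have hcast : ((c.toNat - 97 : Nat) : Int) = (c.toNat : Int) - 97 := by omega
    simp only [List.foldl_cons, pvStepA, hidx, List.map_cons, List.zip_cons_cons,
      List.sum_cons, List.length_cons]
    rw [← hcast, ih hrest _ _ ht, pv_dist p (c.toNat - 97) hp ht]
    have hlen : (pvLc.length : Int) = 26 := by decide
    rw [hlen]
    push_cast
    ring

-- ===== VERDICT =====
set_option maxHeartbeats 1600000 in
theorem min_time_to_type_word_spec : Claim_equal_min_time_to_type_word := by
  intro word _dom hpre
  have hpre' : ∀ c ∈ word.toList, 97 ≤ c.toNat ∧ c.toNat ≤ 122 := by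
    intro c hc
    have := List.all_eq_true.mp hpre c hc
    simpa using this
  unfold Spec_min_time_to_type_word min_time_to_type_word min_time_to_type_word_alt
  have h0 : ((PySem.List.index? pvLc 'a').getD 0 : Int) = ((0 : Nat) : Int) := by decide
  rw [h0, pv_mainA word.toList hpre' 0 0 (by omega)]
  simp only [List.tail_cons, PySem.Dict.foldl_insert_getD_add_one_eq_counter,
    PySem.Dict.items_counter, List.map_map, Function.comp_def, Nat.cast_zero]
  have hsum :
      (List.map
          (fun k : Int × Int =>
            pvLookup k.1 k.2 *
              ((List.count k
                  (((0 : Int) :: word.toList.map (fun c => (c.toNat : Int) - 97)).zip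
                    (word.toList.map (fun c => (c.toNat : Int) - 97))) : Nat) : Int))
          (PySem.Set.ofList
            (((0 : Int) :: word.toList.map (fun c => (c.toNat : Int) - 97)).zip
              (word.toList.map (fun c => (c.toNat : Int) - 97))))).sum =
      (List.map (fun pr : Int × Int => pvLookup pr.1 pr.2)
          (((0 : Int) :: word.toList.map (fun c => (c.toNat : Int) - 97)).zip
            (word.toList.map (fun c => (c.toNat : Int) - 97)))).sum :=
    pv_sum_count _ (PySem.Set.nodup_ofList _) (fun pr : Int × Int => pvLookup pr.1 pr.2) _
      (fun k hk => (PySem.Set.mem_ofList _ _).mpr hk)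
  rw [hsum]
  ring
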